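-- pv_equiv track=rewrite | github.com/ixobert/advent-code-2020 | Day-9/main.py | run2
-- ===== SOURCE A (Python) =====
-- from typing import Dict, List, Tuple
--
-- def run2(entries:List[str], preamble_size:int) -> int:
--     def helper(entries_:List[str], target:int) -> bool:
--         for i, value in enumerate(entries_):
--             if target - value in entries_:
--                 if target -value != value:
--                     return True
--         return False
--
--     def find_bad_number(entries:List[str], preamble_size:int):
--         for i in range(preamble_size, len(entries)):
--             start = max(0, i - preamble_size)
--             end = start + preamble_size
--             check_pair = helper(entries_=entries[start:end], target=entries[i])
--             if check_pair is False:
--                return entries[i]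
--         return result
--
--     result = 0
--     bad_number = find_bad_number(entries=entries, preamble_size=preamble_size)
--
--     for i in range(len(entries)):
--         for j in range(i, len(entries)):
--             current_sum = sum(entries[i:j])
--             if current_sum == bad_number:
--                 return entries[i] + entries[j-2]
--     return result
-- ===== SOURCE B (Python) =====
-- def run2(entries, preamble_size):
--     n = len(entries)
--
--     def has_pair(window, t):
--         return any(t - v in window and t != 2 * v for v in window)
--
--     bad = next((entries[i] for i in range(preamble_size, n)
--                 if not has_pair(set(entries[max(0, i - preamble_size):
--                                             max(0, i - preamble_size) + preamble_size]),
--                                 entries[i])), 0)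
--
--     prefix = [0]
--     for v in entries:
--         prefix.append(prefix[-1] + v)
--
--     pos = {}
--     for j in range(n):
--         pos[prefix[j]] = pos.get(prefix[j], []) + [j]
--
--     for i in range(n):
--         j = next((j for j in pos.get(bad + prefix[i], []) if j >= i), None)
--         if j is not None:
--             return entries[i] + entries[j - 2]
--     return 0
-- ===== Notes on version B (the rewrite author's own statement) =====
-- stated objective: faster
-- what changed: B precomputes prefix sums and builds a dictionary from each prefix value to its ascending list of positions, so the contiguous-range search does one lookup per start index instead of A's inner scan that re-sums every slice, and the preamble pair test uses a set instead of repeated list membership.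
import Mathlib
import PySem

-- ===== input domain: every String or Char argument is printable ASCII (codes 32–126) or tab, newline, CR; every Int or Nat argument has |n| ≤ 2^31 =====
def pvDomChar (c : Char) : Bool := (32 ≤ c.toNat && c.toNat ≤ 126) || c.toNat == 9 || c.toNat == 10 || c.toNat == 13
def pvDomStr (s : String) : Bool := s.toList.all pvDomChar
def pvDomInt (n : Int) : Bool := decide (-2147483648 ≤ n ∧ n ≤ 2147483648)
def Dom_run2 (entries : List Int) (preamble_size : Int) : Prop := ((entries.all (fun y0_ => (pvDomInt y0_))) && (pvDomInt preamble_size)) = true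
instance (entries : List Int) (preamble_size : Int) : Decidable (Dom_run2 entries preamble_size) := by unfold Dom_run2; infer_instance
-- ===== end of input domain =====

-- B replaces A's quadruply-nested search (O(n) sum() inside the O(n^2) pair scan, O(p) list
-- membership inside helper) by prefix sums plus a hash index from prefix value to its positions,
-- so the contiguous-range search does one dictionary lookup per start index: O(n^3+n*p^2) -> O(n^2+n*p) worst case.

-- shared indexing primitive: entries[i] (Python indexing, negative from the end); inside Pre_ it is always in range
def pyAt (xs : List Int) (i : Int) : Int := (PySem.List.pyGet? xs i).getD 0

-- ===== PORT A =====

-- helper: for value in entries_: if target - value in entries_: if target - value != value: return True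
def helperA (orig : List Int) (target : Int) : List Int → Bool
  | [] => false
  | v :: tl =>
    if orig.contains (target - v) then
      if target - v ≠ v then true else helperA orig target tl
    else helperA orig target tl

-- find_bad_number: loop over i in range(preamble_size, len(entries)); falls through to result = 0
def findBadA (entries : List Int) (p : Int) : List Int → Int
  | [] => 0
  | i :: rest =>
    let start := max 0 (i - p)
    let stop := start + p
    let sl := PySem.List.slice entries (some start) (some stop)
    if helperA sl (pyAt entries i) sl = false then pyAt entries i
    else findBadA entries p rest

-- inner loop: for j in range(i, len(entries)): if sum(entries[i:j]) == bad: return entries[i]+entries[j-2]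
def innerA (entries : List Int) (bad : Int) (i : Int) : List Int → Option Int
  | [] => none
  | j :: rest =>
    if (PySem.List.slice entries (some i) (some j)).sum = bad then
      some (pyAt entries i + pyAt entries (j - 2))
    else innerA entries bad i rest

def outerA (entries : List Int) (bad : Int) : List Int → Option Int
  | [] => none
  | i :: rest =>
    match innerA entries bad i (PySem.List.pyRange i (entries.length : Int) 1) with
    | some r => some r
    | none => outerA entries bad rest

def run2 (entries : List Int) (preamble_size : Int) : Int :=
  let bad := findBadA entries preamble_size
      (PySem.List.pyRange preamble_size (entries.length : Int) 1)
  (outerA entries bad (PySem.List.pyRange 0 (entries.length : Int) 1)).getD 0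

-- ===== PORT B =====
-- has_pair(window, t): any(t - v in window and t != 2*v for v in window)
def hasPairB (w : PySem.Set Int) (t : Int) : Bool :=
  w.any (fun v => PySem.Set.contains w (t - v) && decide (t ≠ 2 * v))

-- the preamble window of index i as a set
def windowB (entries : List Int) (p i : Int) : PySem.Set Int :=
  PySem.Set.ofList (PySem.List.slice entries (some (max 0 (i - p))) (some (max 0 (i - p) + p)))

-- bad = next((entries[i] for i in range(p, n) if not has_pair(...)), 0)
def badB (entries : List Int) (p : Int) : Int :=
  (((PySem.List.pyRange p (entries.length : Int) 1).find?
      (fun i => !hasPairB (windowB entries p i) (pyAt entries i))).map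
    (fun i => pyAt entries i)).getD 0

-- prefix = [0]; for v in entries: prefix.append(prefix[-1] + v)   (acc carries prefix[-1])
def prefixB (acc : Int) : List Int → List Int
  | [] => [acc]
  | v :: tl => acc :: prefixB (acc + v) tl

-- pos = {}; for j in range(n): pos[prefix[j]] = pos.get(prefix[j], []) + [j]
def posB (entries pref : List Int) : PySem.Dict Int (List Int) :=
  (PySem.List.pyRange 0 (entries.length : Int) 1).foldl
    (fun d j => d.modify (pyAt pref j) [] (· ++ [j])) PySem.Dict.empty

-- for i in range(n): j = next((j for j in pos.get(bad+prefix[i], []) if j >= i), None); if j is not None: return …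
def run2_alt (entries : List Int) (preamble_size : Int) : Int :=
  let bad := badB entries preamble_size
  let pref := prefixB 0 entries
  let pos := posB entries pref
  ((PySem.List.pyRange 0 (entries.length : Int) 1).findSome?
      (fun i => ((pos.getD (bad + pyAt pref i) []).find? (fun j => decide (i ≤ j))).map
        (fun j => pyAt entries i + pyAt entries (j - 2)))).getD 0

-- ===== PRECONDITION & SPEC =====
-- Pre_ excludes exactly the inputs where A raises IndexError: preamble_size < -len(entries)
-- (entries[i] out of range in find_bad_number), and singleton lists whose bad number is 0
-- (entries[-2] out of range in the final return).
def Pre_run2 (entries : List Int) (preamble_size : Int) : Prop :=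
  -(entries.length : Int) ≤ preamble_size ∧
  ¬(entries.length = 1 ∧ (1 ≤ preamble_size ∨ entries.headD 0 = 0))
instance (entries : List Int) (preamble_size : Int) : Decidable (Pre_run2 entries preamble_size) := by
  unfold Pre_run2; infer_instance

def pvWitness_run2 : List Int × Int := ([1, 2, 3, 4, 5], 2)

def Spec_run2 (entries : List Int) (preamble_size : Int) (out : Int) : Prop := out = run2_alt entries preamble_size
instance (entries : List Int) (preamble_size : Int) (out : Int) : Decidable (Spec_run2 entries preamble_size out) := by unfold Spec_run2; infer_instance

-- ===== CLAIM (what is proved, stated in full; the proofs are below) =====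
def Claim_equal_run2 : Prop := ∀ (entries : List Int) (preamble_size : Int), Dom_run2 entries preamble_size → Pre_run2 entries preamble_size → Spec_run2 entries preamble_size (run2 entries preamble_size)

-- ===== LEMMAS AND PROOFS =====

theorem helperA_eq_any (orig : List Int) (t : Int) (l : List Int) :
    helperA orig t l = l.any (fun v => orig.contains (t - v) && decide (t - v ≠ v)) := by
  induction l with
  | nil => rfl
  | cons v tl ih =>
    simp only [helperA, List.any_cons, ih]
    by_cases h1 : t - v ∈ orig
    · by_cases h2 : t - v = v <;> simp [h1, h2]
    · simp [h1]

theorem helper_sides_eq (s : List Int) (t : Int) :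
    helperA s t s = hasPairB (PySem.Set.ofList s) t := by
  rw [helperA_eq_any, hasPairB, Bool.eq_iff_iff]
  simp only [List.any_eq_true, PySem.Set.contains]
  constructor
  · rintro ⟨v, hv, h⟩
    refine ⟨v, ?_, ?_⟩
    · simpa [PySem.Set.mem_ofList] using hv
    · simp only [Bool.and_eq_true, decide_eq_true_eq] at h ⊢
      refine ⟨?_, ?_⟩
      · simpa [PySem.Set.mem_ofList] using h.1
      · omega
  · rintro ⟨v, hv, h⟩
    refine ⟨v, ?_, ?_⟩
    · simpa [PySem.Set.mem_ofList] using hv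
    · simp only [Bool.and_eq_true, decide_eq_true_eq] at h ⊢
      refine ⟨?_, ?_⟩
      · simpa [PySem.Set.mem_ofList] using h.1
      · omega

-- A's early-return search for the bad number IS a find? over the index range
theorem findBadA_eq_find? (entries : List Int) (p : Int) (js : List Int) :
    findBadA entries p js =
      ((js.find? (fun i =>
          !helperA (PySem.List.slice entries (some (max 0 (i - p))) (some (max 0 (i - p) + p)))
            (pyAt entries i)
            (PySem.List.slice entries (some (max 0 (i - p))) (some (max 0 (i - p) + p))))).map
        (fun i => pyAt entries i)).getD 0 := by
  induction js with
  | nil => rfl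
  | cons i rest ih =>
    simp only [findBadA, List.find?_cons]
    by_cases h : helperA (PySem.List.slice entries (some (max 0 (i - p))) (some (max 0 (i - p) + p)))
        (pyAt entries i)
        (PySem.List.slice entries (some (max 0 (i - p))) (some (max 0 (i - p) + p))) = false
    · simp [h]
    · simp [h, ih]

-- and its predicate is B's set-based test
theorem bad_sides_eq (entries : List Int) (p : Int) :
    findBadA entries p (PySem.List.pyRange p (entries.length : Int) 1) = badB entries p := by
  rw [findBadA_eq_find?]
  unfold badB
  have hpred : (fun i =>
      !helperA (PySem.List.slice entries (some (max 0 (i - p))) (some (max 0 (i - p) + p)))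
        (pyAt entries i)
        (PySem.List.slice entries (some (max 0 (i - p))) (some (max 0 (i - p) + p)))) =
      (fun i => !hasPairB (windowB entries p i) (pyAt entries i)) := by
    funext i
    rw [helper_sides_eq]
    rfl
  rw [hpred]

theorem innerA_eq_find? (entries : List Int) (bad : Int) (i : Int) (js : List Int) :
    innerA entries bad i js =
      (js.find? (fun j => decide ((PySem.List.slice entries (some i) (some j)).sum = bad))).map
        (fun j => pyAt entries i + pyAt entries (j - 2)) := by
  induction js with
  | nil => rfl
  | cons j rest ih =>
    simp only [innerA, List.find?_cons]
    by_cases h : (PySem.List.slice entries (some i) (some j)).sum = bad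
    · simp [h]
    · simp [h, ih]

theorem outerA_eq_findSome? (entries : List Int) (bad : Int) (is : List Int) :
    outerA entries bad is =
      is.findSome? (fun i => innerA entries bad i (PySem.List.pyRange i (entries.length : Int) 1)) := by
  induction is with
  | nil => rfl
  | cons i rest ih =>
    simp only [outerA, List.findSome?_cons, ih]
    cases innerA entries bad i (PySem.List.pyRange i (entries.length : Int) 1) <;> rfl

theorem prefixB_get (entries : List Int) (a : Int) (k : Nat) (hk : k ≤ entries.length) :
    pyAt (prefixB a entries) (k : Int) = a + (entries.take k).sum := by
  induction entries generalizing a k with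
  | nil =>
    have hk0 : k = 0 := by simpa using hk
    subst hk0
    simp [prefixB, pyAt]
  | cons v tl ih =>
    cases k with
    | zero => simp [prefixB, pyAt]
    | succ m =>
      have : ((m + 1 : Nat) : Int) = (m : Int) + 1 := by push_cast; ring
      rw [this]
      simp only [prefixB, pyAt, PySem.List.pyGet?_cons_succ]
      have := ih (a + v) m (by simpa using hk)
      simp only [pyAt] at this
      rw [this]
      simp [List.sum_cons]
      ring

theorem slice_sum_eq_prefix (entries : List Int) (i j : Nat) (hij : i ≤ j)
    (hj : j ≤ entries.length) :
    (PySem.List.slice entries (some (i : Int)) (some (j : Int))).sum =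
      pyAt (prefixB 0 entries) (j : Int) - pyAt (prefixB 0 entries) (i : Int) := by
  rw [PySem.List.slice_natCast, prefixB_get entries 0 j hj,
      prefixB_get entries 0 i (le_trans hij hj)]
  have h1 : (entries.take j).sum = (entries.take i).sum + ((entries.drop i).take (j - i)).sum := by
    have : entries.take j = entries.take i ++ ((entries.drop i).take (j - i)) := by
      rw [← List.take_append_drop i (entries.take j)]
      congr 1
      · rw [List.take_take, min_eq_left hij]
      · rw [List.drop_take]
    rw [this, List.sum_append]
  omega

theorem find?_congr_mem {α : Type} (l : List α) (p q : α → Bool)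
    (h : ∀ x ∈ l, p x = q x) : l.find? p = l.find? q := by
  induction l with
  | nil => rfl
  | cons x tl ih =>
    simp only [List.find?_cons, h x (by simp)]
    cases hq : q x
    · simp [ih (fun y hy => h y (by simp [hy]))]
    · simp

theorem findSome?_congr_mem {α β : Type} (l : List α) (f g : α → Option β)
    (h : ∀ x ∈ l, f x = g x) : l.findSome? f = l.findSome? g := by
  induction l with
  | nil => rfl
  | cons x tl ih =>
    simp only [List.findSome?_cons, h x (by simp)]
    cases g x
    · simp [ih (fun y hy => h y (by simp [hy]))]
    · rfl

-- the position dictionary looks up to exactly the ascending list of indices with that prefix value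
theorem posB_getD (entries pref : List Int) (v : Int) :
    (posB entries pref).getD v [] =
      ((PySem.List.pyRange 0 (entries.length : Int) 1).filter
        (fun j => pyAt pref j == v)) := by
  unfold posB
  rw [show ((PySem.List.pyRange 0 (entries.length : Int) 1).foldl
        (fun d j => d.modify (pyAt pref j) [] (· ++ [j])) PySem.Dict.empty)
      = (((PySem.List.pyRange 0 (entries.length : Int) 1).map
          (fun j => (pyAt pref j, j))).foldl
          (fun d p => d.modify p.1 [] (· ++ [p.2])) PySem.Dict.empty) by
    rw [List.foldl_map]]
  rw [PySem.Dict.getD_foldl_modify_append]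
  simp [List.filter_map, Function.comp_def]

-- a find? for (i ≤ ·) over a filtered ascending-from-i list is the find? of the filter predicate
theorem find?_ge_filter (i : Int) (q : Int → Bool) (l : List Int) (h : ∀ x ∈ l, i ≤ x) :
    (l.filter q).find? (fun j => decide (i ≤ j)) = l.find? q := by
  induction l with
  | nil => rfl
  | cons x tl ih =>
    have hx : i ≤ x := h x (by simp)
    by_cases hq : q x = true
    · simp [hq, hx]
    · simp only [List.filter_cons, hq, if_neg, List.find?_cons, Bool.not_eq_true] at *
      simp [ih (fun y hy => h y (by simp [hy]))]

theorem find?_lt_none (i : Int) (l : List Int) (h : ∀ x ∈ l, x < i) :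
    l.find? (fun j => decide (i ≤ j)) = none := by
  rw [List.find?_eq_none]
  intro x hx
  simp only [decide_eq_true_eq]
  exact not_le.mpr (h x hx)

-- per start index i: A's inner scan = B's lookup in the position dictionary
theorem inner_sides_eq (entries : List Int) (bad : Int) (i : Nat)
    (hi : (i : Int) ≤ (entries.length : Int)) :
    innerA entries bad (i : Int) (PySem.List.pyRange (i : Int) (entries.length : Int) 1) =
      (((posB entries (prefixB 0 entries)).getD (bad + pyAt (prefixB 0 entries) (i : Int)) []).find?
          (fun j => decide ((i : Int) ≤ j))).map
        (fun j => pyAt entries (i : Int) + pyAt entries (j - 2)) := by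
  rw [innerA_eq_find?, posB_getD,
      PySem.List.pyRange_one_append 0 (i : Int) (entries.length : Int) (by positivity) hi,
      List.filter_append, List.find?_append]
  rw [find?_lt_none (i : Int) _ (fun x hx => by
        have := (PySem.List.mem_pyRange_one).1 (List.mem_filter.1 hx).1
        omega)]
  rw [Option.none_or]
  rw [find?_ge_filter (i : Int) _ _ (fun x hx => ((PySem.List.mem_pyRange_one).1 hx).1)]
  refine congrArg _ (find?_congr_mem _ _ _ (fun j hj => ?_))
  have hj := (PySem.List.mem_pyRange_one).1 hj
  obtain ⟨jn, rfl⟩ : ∃ jn : Nat, j = (jn : Int) := ⟨j.toNat, by omega⟩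
  have h1 : i ≤ jn := by exact_mod_cast hj.1
  have h2 : jn ≤ entries.length := by exact_mod_cast le_of_lt hj.2
  rw [slice_sum_eq_prefix entries i jn h1 h2, Bool.eq_iff_iff]
  simp only [decide_eq_true_eq, beq_iff_eq]
  omega

-- ===== VERDICT (by name: the statement is the Claim_ definition above) =====
theorem run2_spec : Claim_equal_run2 := by
  intro entries p _ _
  unfold Spec_run2
  simp only [run2, run2_alt]
  rw [bad_sides_eq, outerA_eq_findSome?]
  congr 1
  refine findSome?_congr_mem _ _ _ (fun i hi => ?_)
  have hi := (PySem.List.mem_pyRange_one).1 hi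
  obtain ⟨ni, rfl⟩ : ∃ ni : Nat, i = (ni : Int) := ⟨i.toNat, by omega⟩
  exact inner_sides_eq entries _ ni (le_of_lt hi.2)
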